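-- pv_equiv track=rewrite | github.com/Romario27/Intro-Taller-de-Programacion | Introduccion/Codigos/Recursividad de pila/Listas/7) 14-03-18 listas.py | positivos_aux
-- ===== SOURCE A (Python) =====
-- def positivos_aux(lista):
--     if lista==[]:
--         return True
--     else:
--         if lista[0]<0:
--             return False
--         else:
--             return positivos_aux(lista[1:])
-- ===== SOURCE B (Python) =====
-- def positivos_aux(lista):
--     ok = True
--     for x in lista:
--         if x < 0:
--             ok = False
--     return ok
-- ===== Notes on version B (the rewrite author's own statement) =====
-- stated objective: idiomatic
-- what changed: Replaced the tail recursion over successive list slices by a flat iterative pass folding a boolean flag over the elements.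
import Mathlib
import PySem

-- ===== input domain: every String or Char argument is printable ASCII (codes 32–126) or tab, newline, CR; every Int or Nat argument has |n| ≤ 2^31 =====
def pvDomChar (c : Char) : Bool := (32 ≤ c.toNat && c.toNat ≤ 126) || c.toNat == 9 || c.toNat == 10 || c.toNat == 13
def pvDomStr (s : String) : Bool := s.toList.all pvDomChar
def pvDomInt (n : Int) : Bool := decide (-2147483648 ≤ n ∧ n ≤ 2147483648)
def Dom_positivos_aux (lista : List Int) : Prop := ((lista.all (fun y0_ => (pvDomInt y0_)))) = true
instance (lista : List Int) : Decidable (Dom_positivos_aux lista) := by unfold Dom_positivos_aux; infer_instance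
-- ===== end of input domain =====

-- ===== PORT A =====
-- B replaces A's slice-based tail recursion by a single iterative pass folding a flag (idiomatic).
def positivos_aux (lista : List Int) : Bool :=
  if lista = [] then true
  else
    match lista with
    | [] => true
    | x :: rest => if x < 0 then false else positivos_aux rest

-- ===== PORT B =====
def positivos_aux_alt (lista : List Int) : Bool :=
  lista.foldl (fun ok x => if x < 0 then false else ok) true

-- ===== PRECONDITION & SPEC =====
def Spec_positivos_aux (lista : List Int) (out : Bool) : Prop := out = positivos_aux_alt lista
instance (lista : List Int) (out : Bool) : Decidable (Spec_positivos_aux lista out) := by unfold Spec_positivos_aux; infer_instance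

-- ===== CLAIM (what is proved, stated in full; the proofs are below) =====
def Claim_equal_positivos_aux : Prop := ∀ (lista : List Int), Dom_positivos_aux lista → Spec_positivos_aux lista (positivos_aux lista)

-- ===== LEMMAS AND PROOFS =====

-- ===== VERDICT (by name: the statement is the Claim_ definition above) =====
lemma foldl_flag_false (l : List Int) :
    l.foldl (fun ok x => if x < 0 then false else ok) false = false := by
  induction l with
  | nil => rfl
  | cons x rest ih => simpa [List.foldl] using ih

lemma positivos_eq (l : List Int) : positivos_aux l = positivos_aux_alt l := by
  induction l with
  | nil => rfl
  | cons x rest ih =>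
    unfold positivos_aux positivos_aux_alt
    by_cases h : x < 0
    · have hf := foldl_flag_false rest
      simp only [List.foldl] at hf ⊢
      simpa [h] using hf
    · simpa [List.foldl, h, positivos_aux_alt] using ih

theorem positivos_aux_spec : Claim_equal_positivos_aux := by
  intro lista _
  unfold Spec_positivos_aux
  exact positivos_eq lista
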